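-- pv_equiv track=rewrite | github.com/DazedtilDawn/AIAgentWorkflow | ai_agents/refactor_analyst.py | _extract_code_changes
-- ===== SOURCE A (Python) =====
-- from typing import Dict, List, Optional, Any
--
-- def _extract_code_changes(text: str) -> List[Dict[str, str]]:
--     """Extract structured code changes from text."""
--     if not text:
--         return []
--
--     changes = []
--     current_change = {}
--
--     lines = text.strip().split("\n")
--     for line in lines:
--         if line.startswith("File:"):
--             if current_change:
--                 changes.append(current_change)
--             current_change = {"file": line[5:].strip()}
--         elif line.startswith("Line:"):
--             current_change["line"] = line[5:].strip()
--         elif line.startswith("Change:"):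
--             current_change["change"] = line[7:].strip()
--
--     if current_change:
--         changes.append(current_change)
--
--     return changes
-- ===== SOURCE B (Python) =====
-- from typing import Dict, List
--
-- def _extract_code_changes(text: str) -> List[Dict[str, str]]:
--     """Extract structured code changes from text (group-then-build decomposition)."""
--     if not text:
--         return []
--     # Partition lines into consecutive groups; each "File:" line starts a new group.
--     groups = []
--     cur = []
--     for line in text.strip().split("\n"):
--         if line.startswith("File:"):
--             groups.append(cur)
--             cur = [line]
--         else:
--             cur.append(line)
--     groups.append(cur)
--     # Build one dict per group; keep only the non-empty ones.
--     result = []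
--     for g in groups:
--         d = {}
--         for line in g:
--             if line.startswith("File:"):
--                 d["file"] = line[5:].strip()
--             elif line.startswith("Line:"):
--                 d["line"] = line[5:].strip()
--             elif line.startswith("Change:"):
--                 d["change"] = line[7:].strip()
--         if d:
--             result.append(d)
--     return result
-- ===== Notes on version B (the rewrite author's own statement) =====
-- stated objective: alternative
-- what changed: Replaces A's single stateful scan (a mutable current dict carried across lines, flushed when the next file-header line arrives and again after the loop) by a two-phase decomposition: first partition the lines into consecutive groups at each file-header line, then build one dict per group and keep the non-empty ones, so the leading orphan group and empty-group suppression fall out of one uniform rule.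
import Mathlib
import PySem

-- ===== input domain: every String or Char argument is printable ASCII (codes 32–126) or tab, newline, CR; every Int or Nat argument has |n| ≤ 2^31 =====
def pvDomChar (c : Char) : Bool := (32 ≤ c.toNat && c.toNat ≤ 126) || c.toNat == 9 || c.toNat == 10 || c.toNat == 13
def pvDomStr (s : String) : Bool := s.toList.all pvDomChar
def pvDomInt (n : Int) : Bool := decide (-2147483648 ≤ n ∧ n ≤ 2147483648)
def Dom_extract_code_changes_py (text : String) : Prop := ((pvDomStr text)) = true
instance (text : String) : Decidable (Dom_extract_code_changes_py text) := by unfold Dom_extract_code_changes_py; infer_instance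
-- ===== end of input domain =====

-- B replaces A's single stateful scan by a partition-into-groups-then-build-dicts decomposition (alternative, same cost).

-- ===== PORT A =====
-- one loop step of A: branch on the line's prefix; a "File:" line flushes the non-empty current dict
def pvAStep (st : List (PySem.Dict String String) × PySem.Dict String String) (line : String) :
    List (PySem.Dict String String) × PySem.Dict String String :=
  if PySem.Str.startswith line "File:" then
    ((if st.2.size ≠ 0 then st.1 ++ [st.2] else st.1),
     (PySem.Dict.empty).insert "file" (PySem.Str.strip (PySem.Str.slice line (some 5) none)))
  else if PySem.Str.startswith line "Line:" then
    (st.1, st.2.insert "line" (PySem.Str.strip (PySem.Str.slice line (some 5) none)))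
  else if PySem.Str.startswith line "Change:" then
    (st.1, st.2.insert "change" (PySem.Str.strip (PySem.Str.slice line (some 7) none)))
  else st

-- the trailing "if current_change: changes.append(current_change)"
def pvFinalize (st : List (PySem.Dict String String) × PySem.Dict String String) :
    List (PySem.Dict String String) :=
  if st.2.size ≠ 0 then st.1 ++ [st.2] else st.1

-- split? is never none here since the separator "\n" is non-empty
def extract_code_changes_py (text : String) : List (List (String × String)) :=
  if text = "" then []
  else
    (pvFinalize
      (((PySem.Str.split? (PySem.Str.strip text) "\n").getD []).foldl
        pvAStep ([], PySem.Dict.empty))).map (fun d => d.items)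

-- ===== PORT B =====
-- phase 1: partition lines into consecutive groups, a "File:" line starting a new group
def pvGroupStep (st : List (List String) × List String) (line : String) :
    List (List String) × List String :=
  if PySem.Str.startswith line "File:" then (st.1 ++ [st.2], [line]) else (st.1, st.2 ++ [line])

-- the final "groups.append(cur)"
def pvClose (st : List (List String) × List String) : List (List String) := st.1 ++ [st.2]

def pvGroups (lines : List String) : List (List String) :=
  pvClose (lines.foldl pvGroupStep ([], []))

-- phase 2: build one dict from a group's lines
def pvBuildStep (d : PySem.Dict String String) (line : String) : PySem.Dict String String :=
  if PySem.Str.startswith line "File:" then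
    d.insert "file" (PySem.Str.strip (PySem.Str.slice line (some 5) none))
  else if PySem.Str.startswith line "Line:" then
    d.insert "line" (PySem.Str.strip (PySem.Str.slice line (some 5) none))
  else if PySem.Str.startswith line "Change:" then
    d.insert "change" (PySem.Str.strip (PySem.Str.slice line (some 7) none))
  else d

def pvBuild (g : List String) : PySem.Dict String String :=
  g.foldl pvBuildStep PySem.Dict.empty

-- "if d: result.append(d)"
def pvEmitOne (g : List String) : Option (List (String × String)) :=
  if (pvBuild g).size ≠ 0 then some (pvBuild g).items else none

def extract_code_changes_py_alt (text : String) : List (List (String × String)) :=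
  if text = "" then []
  else
    (pvGroups ((PySem.Str.split? (PySem.Str.strip text) "\n").getD [])).filterMap pvEmitOne

-- ===== PRECONDITION & SPEC =====
def Spec_extract_code_changes_py (text : String) (out : List (List (String × String))) : Prop := out = extract_code_changes_py_alt text
instance (text : String) (out : List (List (String × String))) : Decidable (Spec_extract_code_changes_py text out) := by unfold Spec_extract_code_changes_py; infer_instance

-- ===== CLAIM (what is proved, stated in full; the proofs are below) =====
def Claim_equal_extract_code_changes_py : Prop := ∀ (text : String), Dom_extract_code_changes_py text → Spec_extract_code_changes_py text (extract_code_changes_py text)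

-- ===== LEMMAS AND PROOFS =====

-- proof-side view of B's filterMap, kept as dicts
def pvEmit (groups : List (List String)) : List (PySem.Dict String String) :=
  groups.filterMap (fun g => if (pvBuild g).size ≠ 0 then some (pvBuild g) else none)

lemma pvGroupStep_pos (st : List (List String) × List String) (l : String)
    (h : PySem.Str.startswith l "File:" = true) : pvGroupStep st l = (st.1 ++ [st.2], [l]) := by
  simp only [pvGroupStep, if_pos h]

lemma pvGroupStep_neg (st : List (List String) × List String) (l : String)
    (h : ¬ PySem.Str.startswith l "File:" = true) : pvGroupStep st l = (st.1, st.2 ++ [l]) := by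
  simp only [pvGroupStep, if_neg h]

lemma pvAStep_pos (cs : List (PySem.Dict String String)) (d : PySem.Dict String String)
    (l : String) (h : PySem.Str.startswith l "File:" = true) :
    pvAStep (cs, d) l = ((if d.size ≠ 0 then cs ++ [d] else cs), pvBuild [l]) := by
  simp only [pvAStep, pvBuild, List.foldl_cons, List.foldl_nil, pvBuildStep, if_pos h]

lemma pvAStep_neg (cs : List (PySem.Dict String String)) (d : PySem.Dict String String)
    (l : String) (h : ¬ PySem.Str.startswith l "File:" = true) :
    pvAStep (cs, d) l = (cs, pvBuildStep d l) := by
  simp only [pvAStep, pvBuildStep, if_neg h]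
  split_ifs <;> rfl

lemma pvBuild_append (cur : List String) (l : String) :
    pvBuild (cur ++ [l]) = pvBuildStep (pvBuild cur) l := by
  simp [pvBuild, List.foldl_append]

lemma pvEmit_singleton (g : List String) :
    pvEmit [g] = if (pvBuild g).size ≠ 0 then [pvBuild g] else [] := by
  by_cases h : (pvBuild g).size ≠ 0 <;> simp [pvEmit, h]

lemma pvEmit_cons (g : List String) (gs : List (List String)) :
    pvEmit (g :: gs) = (if (pvBuild g).size ≠ 0 then [pvBuild g] else []) ++ pvEmit gs := by
  by_cases h : (pvBuild g).size ≠ 0 <;> simp [pvEmit, h]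

lemma pvGroup_prefix (ls : List String) (gs : List (List String)) (cur : List String) :
    ls.foldl pvGroupStep (gs, cur) =
      (gs ++ (ls.foldl pvGroupStep ([], cur)).1, (ls.foldl pvGroupStep ([], cur)).2) := by
  induction ls generalizing gs cur with
  | nil => simp
  | cons l ls ih =>
      by_cases h : PySem.Str.startswith l "File:" = true
      · rw [List.foldl_cons, List.foldl_cons, pvGroupStep_pos _ _ h, pvGroupStep_pos _ _ h]
        rw [List.nil_append, ih (gs ++ [cur]) [l], ih [cur] [l]]
        simp [List.append_assoc]
      · rw [List.foldl_cons, List.foldl_cons, pvGroupStep_neg _ _ h, pvGroupStep_neg _ _ h]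
        exact ih gs (cur ++ [l])

lemma pvMain (ls : List String) (cs : List (PySem.Dict String String)) (cur : List String) :
    pvFinalize (ls.foldl pvAStep (cs, pvBuild cur)) =
      cs ++ pvEmit ((ls.foldl pvGroupStep ([], cur)).1 ++ [(ls.foldl pvGroupStep ([], cur)).2]) := by
  induction ls generalizing cs cur with
  | nil =>
      simp only [List.foldl_nil, pvFinalize, pvEmit_singleton, List.nil_append]
      split_ifs with h <;> simp
  | cons l ls ih =>
      by_cases h : PySem.Str.startswith l "File:" = true
      · rw [List.foldl_cons, List.foldl_cons, pvAStep_pos _ _ _ h, pvGroupStep_pos _ _ h]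
        simp only [List.nil_append]
        rw [ih _ [l], pvGroup_prefix ls [cur] [l]]
        have hsh : (([cur] ++ (List.foldl pvGroupStep ([], [l]) ls).1) ++
            [(List.foldl pvGroupStep ([], [l]) ls).2]) =
            cur :: ((List.foldl pvGroupStep ([], [l]) ls).1 ++
              [(List.foldl pvGroupStep ([], [l]) ls).2]) := by simp
        rw [hsh, pvEmit_cons]
        split_ifs with h' <;> simp
      · rw [List.foldl_cons, List.foldl_cons, pvAStep_neg _ _ _ h, pvGroupStep_neg _ _ h]
        simp only [List.nil_append]
        rw [← pvBuild_append]
        exact ih cs (cur ++ [l])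

lemma pvEmit_items (groups : List (List String)) :
    (pvEmit groups).map (fun d => d.items) = groups.filterMap pvEmitOne := by
  induction groups with
  | nil => rfl
  | cons g gs ih =>
      by_cases h : (pvBuild g).size ≠ 0 <;>
        simp [pvEmit, pvEmitOne, h, pvEmit] at ih ⊢ <;> simpa [pvEmit, pvEmitOne] using ih

-- ===== VERDICT (by name: the statement is the Claim_ definition above) =====
theorem extract_code_changes_py_spec : Claim_equal_extract_code_changes_py := by
  intro text _
  unfold Spec_extract_code_changes_py extract_code_changes_py extract_code_changes_py_alt
  by_cases h : text = ""
  · rw [if_pos h, if_pos h]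
  · rw [if_neg h, if_neg h]
    have h0 : (PySem.Dict.empty : PySem.Dict String String) = pvBuild [] := rfl
    rw [h0, pvMain _ [] [], List.nil_append, pvEmit_items]
    simp [pvGroups, pvClose]
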